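-- pv_equiv track=rewrite | github.com/xhepan/Chess-AI | part-3/sub2.py | most_common_move
-- ===== SOURCE A (Python) =====
-- def most_common_move(moves):
--     move_occur = {}
--     for move in moves:
--         move_occur[move] = move_occur.get(move, 0) + 1
--
--     max_num_occur = max(move_occur.values())
--
--     most_common_moves = []
--     for move, count in move_occur.items():
--         if count == max_num_occur:
--             most_common_moves.append(move)
--
--     return sorted(most_common_moves)[0]
-- ===== SOURCE B (Python) =====
-- def most_common_move(moves):
--     move_occur = {}
--     for move in moves:
--         move_occur[move] = move_occur.get(move, 0) + 1
--     best = None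
--     for move, count in move_occur.items():
--         if best is None or count > best[1] or (count == best[1] and move < best[0]):
--             best = (move, count)
--     return best[0]
-- ===== Notes on version B (the rewrite author's own statement) =====
-- stated objective: simpler
-- what changed: The counting loop stays, but the max-of-values pass, the filter pass building the tied list and the final sort are replaced by a single running-best scan over the count table that keeps the (smallest-move, highest-count) pair.
import Mathlib
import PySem

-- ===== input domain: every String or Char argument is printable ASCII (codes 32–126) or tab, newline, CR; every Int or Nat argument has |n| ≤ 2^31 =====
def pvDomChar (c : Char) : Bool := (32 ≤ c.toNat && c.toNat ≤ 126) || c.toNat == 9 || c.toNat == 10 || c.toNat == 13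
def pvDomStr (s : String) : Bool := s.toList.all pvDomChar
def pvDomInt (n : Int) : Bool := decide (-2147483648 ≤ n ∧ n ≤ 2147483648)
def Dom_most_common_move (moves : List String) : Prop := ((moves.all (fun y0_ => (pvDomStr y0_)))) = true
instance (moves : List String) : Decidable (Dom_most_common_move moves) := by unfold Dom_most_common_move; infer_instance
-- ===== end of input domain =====

-- B replaces A's max/filter/sort extraction with a single running-best scan over the count table (simpler; same counting loop).


-- ===== PORT A =====
def most_common_move (moves : List String) : String :=
  let move_occur := moves.foldl (fun d move => d.insert move (d.getD move 0 + 1))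
    (PySem.Dict.empty : PySem.Dict String Int)
  match PySem.List.max? move_occur.values (fun v => v) with
  | none => ""  -- max() of an empty sequence raises ValueError; excluded by Pre_
  | some max_num_occur =>
    let most_common_moves := move_occur.items.foldl
      (fun acc p => if p.2 == max_num_occur then acc ++ [p.1] else acc) []
    PySem.List.pyGetD (PySem.List.sorted most_common_moves (fun x => x) false) 0 ""

-- ===== PORT B =====
def most_common_move_alt (moves : List String) : String :=
  let move_occur := moves.foldl (fun d move => d.insert move (d.getD move 0 + 1))
    (PySem.Dict.empty : PySem.Dict String Int)
  let best := move_occur.items.foldl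
    (fun best p =>
      match best with
      | none => some p
      | some b => if b.2 < p.2 || (p.2 == b.2 && p.1 < b.1) then some p else some b)
    none
  match best with
  | none => ""  -- best[0] with best = None raises; excluded by Pre_
  | some b => b.1

-- ===== PRECONDITION & SPEC =====
-- Pre_ excludes only the empty list, on which A raises ValueError (max() of an empty sequence).
def Pre_most_common_move (moves : List String) : Prop := moves ≠ []
instance (moves : List String) : Decidable (Pre_most_common_move moves) := by unfold Pre_most_common_move; infer_instance
def pvWitness_most_common_move : List String := (["e4", "d4", "e4"])
def Spec_most_common_move (moves : List String) (out : String) : Prop := out = most_common_move_alt moves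
instance (moves : List String) (out : String) : Decidable (Spec_most_common_move moves out) := by unfold Spec_most_common_move; infer_instance

-- ===== CLAIM (what is proved, stated in full; the proofs are below) =====
def Claim_equal_most_common_move : Prop := ∀ (moves : List String), Dom_most_common_move moves → Pre_most_common_move moves → Spec_most_common_move moves (most_common_move moves)

-- ===== LEMMAS AND PROOFS =====

-- 'p is a strictly better candidate than q': higher count, or same count and smaller move.
def pvBetter (p q : String × Int) : Prop := q.2 < p.2 ∨ (p.2 = q.2 ∧ p.1 < q.1)

theorem pvBetter_irrefl (p : String × Int) : ¬ pvBetter p p := by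
  simp [pvBetter]

theorem pvBetter_trans {p q r : String × Int} (h1 : pvBetter p q) (h2 : pvBetter q r) : pvBetter p r := by
  rcases h1 with h1 | ⟨h1, h1'⟩ <;> rcases h2 with h2 | ⟨h2, h2'⟩
  · exact Or.inl (lt_trans h2 h1)
  · exact Or.inl (h2 ▸ h1)
  · exact Or.inl (h1 ▸ h2)
  · exact Or.inr ⟨h1.trans h2, lt_trans h1' h2'⟩

theorem pvBetter_eq_of_not {p q : String × Int} (h1 : ¬ pvBetter p q) (h2 : ¬ pvBetter q p) : p = q := by
  simp only [pvBetter, not_or, not_and, not_lt] at h1 h2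
  have hc : p.2 = q.2 := le_antisymm h1.1 h2.1
  have hs : p.1 = q.1 := le_antisymm (h2.2 hc.symm) (h1.2 hc)
  exact Prod.ext hs hc

theorem pvStep_cond (p b : String × Int) :
    (b.2 < p.2 || (p.2 == b.2 && p.1 < b.1)) = true ↔ pvBetter p b := by
  simp only [pvBetter, Bool.or_eq_true, Bool.and_eq_true, decide_eq_true_eq, beq_iff_eq]

-- B's running-best scan, started at some b, returns a candidate no seen element beats.
theorem pvFold_best (L : List (String × Int)) (b : String × Int) :
    ∃ r, L.foldl
        (fun best p =>
          match best with
          | none => some p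
          | some b => if b.2 < p.2 || (p.2 == b.2 && p.1 < b.1) then some p else some b)
        (some b) = some r ∧ (r = b ∨ r ∈ L) ∧ (∀ q, (q = b ∨ q ∈ L) → ¬ pvBetter q r) := by
  induction L generalizing b with
  | nil =>
    refine ⟨b, rfl, Or.inl rfl, ?_⟩
    rintro q (rfl | h)
    · exact pvBetter_irrefl q
    · simp at h
  | cons p L ih =>
    simp only [List.foldl_cons]
    by_cases hc : pvBetter p b
    · rw [if_pos ((pvStep_cond p b).2 hc)]
      obtain ⟨r, hr, hmem, hbest⟩ := ih p
      refine ⟨r, hr, ?_, ?_⟩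
      · rcases hmem with rfl | h
        · exact Or.inr (List.mem_cons_self ..)
        · exact Or.inr (List.mem_cons_of_mem _ h)
      · rintro q (rfl | hq)
        · -- q = b was dropped because p beats it; p in turn is not better than r
          exact fun hqr => hbest p (Or.inl rfl) (pvBetter_trans hc hqr)
        · rcases List.mem_cons.1 hq with rfl | hq'
          · exact hbest q (Or.inl rfl)
          · exact hbest q (Or.inr hq')
    · rw [if_neg (fun h => hc ((pvStep_cond p b).1 h))]
      obtain ⟨r, hr, hmem, hbest⟩ := ih b
      refine ⟨r, hr, ?_, ?_⟩
      · rcases hmem with rfl | h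
        · exact Or.inl rfl
        · exact Or.inr (List.mem_cons_of_mem _ h)
      · rintro q (rfl | hq)
        · exact hbest q (Or.inl rfl)
        · rcases List.mem_cons.1 hq with rfl | hq'
          · -- q = p was dropped because it does not beat b; it cannot beat r either
            intro hqr
            have hbr : ¬ pvBetter b r := hbest b (Or.inl rfl)
            by_cases h2 : pvBetter r b
            · exact hc (pvBetter_trans hqr h2)
            · exact hc ((pvBetter_eq_of_not hbr h2) ▸ hqr)
          · exact hbest q (Or.inr hq')

-- The two extraction phases agree on any nonempty items list.
theorem pvExtract_eq (L : List (String × Int)) (hL : L ≠ []) :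
    (match PySem.List.max? (L.map Prod.snd) (fun v => v) with
     | none => ""
     | some max_num_occur =>
       PySem.List.pyGetD
         (PySem.List.sorted
           (L.foldl (fun acc p => if p.2 == max_num_occur then acc ++ [p.1] else acc) [])
           (fun x => x) false) 0 "")
    = (match L.foldl
          (fun best p =>
            match best with
            | none => some p
            | some b => if b.2 < p.2 || (p.2 == b.2 && p.1 < b.1) then some p else some b)
          none with
       | none => ""
       | some b => b.1) := by
  -- A side: name the maximum count M
  obtain ⟨M, hM⟩ : ∃ M, PySem.List.max? (L.map Prod.snd) (fun v => v) = some M := by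
    rcases h : PySem.List.max? (L.map Prod.snd) (fun v => v) with _ | M
    · rw [PySem.List.max?_eq_none_iff] at h
      simp [List.map_eq_nil_iff] at h
      exact absurd h hL
    · exact ⟨M, rfl⟩
  rw [hM]
  show PySem.List.pyGetD
      (PySem.List.sorted
        (L.foldl (fun acc p => if p.2 == M then acc ++ [p.1] else acc) [])
        (fun x => x) false) 0 "" = _
  have hMmax : ∀ q ∈ L, q.2 ≤ M := by
    intro q hq
    exact PySem.List.max?_isMax hM _ (List.mem_map_of_mem hq)
  have hMmem : M ∈ L.map Prod.snd := PySem.List.max?_mem hM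
  -- the tied list is the filtered projection
  have htied : L.foldl (fun acc p => if p.2 == M then acc ++ [p.1] else acc) []
      = (L.filter (fun p => p.2 == M)).map Prod.fst := by
    simpa using PySem.List.foldl_append_if (fun p => p.2 == M) Prod.fst L []
  rw [htied]
  -- the tied list is nonempty, so sorted of it has a head m
  have htne : (L.filter (fun p => p.2 == M)).map Prod.fst ≠ [] := by
    obtain ⟨p, hp, hp2⟩ := List.mem_map.1 hMmem
    have hm : p.1 ∈ (L.filter (fun p => p.2 == M)).map Prod.fst :=
      List.mem_map_of_mem (List.mem_filter.2 ⟨hp, by simp [hp2]⟩)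
    intro h
    rw [h] at hm
    simp at hm
  obtain ⟨m, t, hsorted⟩ :
      ∃ m t, PySem.List.sorted ((L.filter (fun p => p.2 == M)).map Prod.fst) (fun x => x) false
        = m :: t := by
    rcases h : PySem.List.sorted ((L.filter (fun p => p.2 == M)).map Prod.fst) (fun x => x) false
      with _ | ⟨m, t⟩
    · rw [PySem.List.sorted_eq_nil_iff] at h; exact absurd h htne
    · exact ⟨m, t, h⟩
  rw [hsorted, PySem.List.pyGetD_zero_cons]
  -- m comes from a pair (m, M) ∈ L that nothing beats
  have hmmem : m ∈ (L.filter (fun p => p.2 == M)).map Prod.fst :=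
    (PySem.List.mem_sorted _ _ _ m).1 (hsorted ▸ List.mem_cons_self ..)
  obtain ⟨pm, hpmF, hpm1⟩ := List.mem_map.1 hmmem
  have hpmL : pm ∈ L := (List.mem_filter.1 hpmF).1
  have hpm2 : pm.2 = M := by simpa using (List.mem_filter.1 hpmF).2
  have hmle : ∀ y ∈ (L.filter (fun p => p.2 == M)).map Prod.fst, m ≤ y :=
    PySem.List.key_head_sorted_le _ (fun x => x) hsorted
  have hAbest : ∀ q ∈ L, ¬ pvBetter q pm := by
    intro q hq hb
    rcases hb with hb | ⟨hb, hb'⟩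
    · exact absurd (hMmax q hq) (by rw [hpm2] at hb; omega)
    · have : q.1 ∈ (L.filter (fun p => p.2 == M)).map Prod.fst :=
        List.mem_map.2 ⟨q, List.mem_filter.2 ⟨hq, by simp [hb, hpm2]⟩, rfl⟩
      exact absurd (hmle q.1 this) (by rw [hpm1] at hb'; exact not_le.2 hb')
  -- B side: run the scan
  rcases L with _ | ⟨p0, L'⟩
  · exact absurd rfl hL
  simp only [List.foldl_cons]
  obtain ⟨r, hr, hrmem, hrbest⟩ := pvFold_best L' p0
  rw [hr]
  -- both are members beaten by nothing, hence equal
  have hrL : r ∈ p0 :: L' := by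
    rcases hrmem with rfl | h
    · exact List.mem_cons_self ..
    · exact List.mem_cons_of_mem _ h
  have h1 : ¬ pvBetter pm r := hrbest pm (List.mem_cons.1 hpmL)
  have h2 : ¬ pvBetter r pm := hAbest r hrL
  have : r = pm := pvBetter_eq_of_not h2 h1
  rw [this]
  exact hpm1.symm

-- ===== VERDICT (by name: the statement is the Claim_ definition above) =====
theorem most_common_move_spec : Claim_equal_most_common_move := by
  intro moves _ hpre
  unfold Spec_most_common_move most_common_move most_common_move_alt
  have hne : (PySem.Dict.counter moves).items ≠ [] := by
    rcases moves with _ | ⟨mv, rest⟩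
    · exact absurd rfl hpre
    · rw [PySem.Dict.items_counter]
      intro h
      have hmem : (mv, ((mv :: rest).count mv : Int)) ∈
          (PySem.Set.ofList (mv :: rest)).map (fun k => (k, ((mv :: rest).count k : Int))) :=
        List.mem_map_of_mem ((PySem.Set.mem_ofList _ mv).2 (List.mem_cons_self ..))
      rw [h] at hmem
      simp at hmem
  exact pvExtract_eq ((PySem.Dict.counter moves).items) hne
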